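-- pv_equiv track=rewrite | github.com/RishitaUikey/Basic-python | Assignment/List/210.py | sum_non_zero_groups
-- ===== SOURCE A (Python) =====
-- def sum_non_zero_groups(nums):
--     sums = []
--     current_sum = 0
--     in_group = False
--
--     for num in nums:
--         if num != 0:
--             current_sum += num
--             in_group = True
--         else:
--             if in_group:
--                 sums.append(current_sum)
--                 current_sum = 0
--                 in_group = False
--
--     if in_group:
--         sums.append(current_sum)
--
--     return sums
-- ===== SOURCE B (Python) =====
-- def sum_non_zero_groups(nums):
--     sums = []
--     i = 0
--     n = len(nums)
--     while i < n:
--         if nums[i] == 0: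
--             i += 1
--         else:
--             s = nums[i]
--             i += 1
--             while i < n and nums[i] != 0:
--                 s += nums[i]
--                 i += 1
--             sums.append(s)
--     return sums
-- ===== Notes on version B (the rewrite author's own statement) =====
-- stated objective: alternative
-- what changed: An index-based outer loop that skips zeros and an inner loop that sums each maximal non-zero run replaces A's single pass over the elements with an in_group flag, running accumulator and end-of-loop flush.
import Mathlib
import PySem

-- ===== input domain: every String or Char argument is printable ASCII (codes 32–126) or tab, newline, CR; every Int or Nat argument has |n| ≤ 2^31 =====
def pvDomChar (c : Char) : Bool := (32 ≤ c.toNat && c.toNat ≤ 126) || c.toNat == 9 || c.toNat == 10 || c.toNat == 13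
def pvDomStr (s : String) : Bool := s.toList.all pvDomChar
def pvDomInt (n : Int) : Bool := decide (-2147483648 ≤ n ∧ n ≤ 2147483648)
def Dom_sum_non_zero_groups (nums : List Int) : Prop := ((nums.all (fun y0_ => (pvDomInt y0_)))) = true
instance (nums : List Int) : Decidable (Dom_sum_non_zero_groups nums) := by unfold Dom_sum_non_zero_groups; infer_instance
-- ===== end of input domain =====

-- B replaces A's flag/accumulator state machine by an index-style scan that skips zeros
-- and sums each maximal non-zero run with an inner loop (alternative decomposition, same cost).


-- ===== PORT A =====
-- state: (sums, current_sum, in_group)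
def pvStepA (st : List Int × Int × Bool) (num : Int) : List Int × Int × Bool :=
  if num ≠ 0 then (st.1, st.2.1 + num, true)
  else if st.2.2 then (st.1 ++ [st.2.1], 0, false)
  else st

def sum_non_zero_groups (nums : List Int) : List Int :=
  let st := nums.foldl pvStepA ([], 0, false)
  if st.2.2 then st.1 ++ [st.2.1] else st.1

-- ===== PORT B =====
-- inner while loop: sum the leading non-zero run, return (sum, remaining list)
def pvSpan : Int → List Int → Int × List Int
  | s, [] => (s, [])
  | s, x :: xs => if x ≠ 0 then pvSpan (s + x) xs else (s, x :: xs)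

theorem pvSpan_len (s : Int) (xs : List Int) : (pvSpan s xs).2.length ≤ xs.length := by
  induction xs generalizing s with
  | nil => simp [pvSpan]
  | cons x xs ih =>
    by_cases h : x = 0 <;> simp [pvSpan, h]
    exact Nat.le_succ_of_le (ih _)

-- outer while loop: skip zeros, otherwise emit the run sum and continue after the run
def sum_non_zero_groups_alt : List Int → List Int
  | [] => []
  | x :: xs =>
    if x = 0 then sum_non_zero_groups_alt xs
    else
      let p := pvSpan x xs
      p.1 :: sum_non_zero_groups_alt p.2
termination_by xs => xs.length
decreasing_by
  · simp
  · simpa using Nat.lt_succ_of_le (pvSpan_len x xs)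

-- ===== PRECONDITION & SPEC =====
def Spec_sum_non_zero_groups (nums : List Int) (out : List Int) : Prop := out = sum_non_zero_groups_alt nums
instance (nums : List Int) (out : List Int) : Decidable (Spec_sum_non_zero_groups nums out) := by unfold Spec_sum_non_zero_groups; infer_instance

-- ===== CLAIM (what is proved, stated in full; the proofs are below) =====
def Claim_equal_sum_non_zero_groups : Prop := ∀ (nums : List Int), Dom_sum_non_zero_groups nums → Spec_sum_non_zero_groups nums (sum_non_zero_groups nums)

-- ===== LEMMAS AND PROOFS =====
def pvFin (st : List Int × Int × Bool) : List Int :=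
  if st.2.2 then st.1 ++ [st.2.1] else st.1

-- Joint loop invariant for A's fold, proved by strong induction on the list length:
-- (1) from an in-group state (sums, c, true) the finished fold equals sums ++ the run-sum
--     continued by B on the rest; (2) from (sums, 0, false) it equals sums ++ B's result.
theorem pvLoop_inv (n : ℕ) : ∀ xs : List Int, xs.length ≤ n →
    (∀ (sums : List Int) (c : Int),
        pvFin (xs.foldl pvStepA (sums, c, true)) =
          sums ++ ((pvSpan c xs).1 :: sum_non_zero_groups_alt (pvSpan c xs).2)) ∧
    (∀ sums : List Int,
        pvFin (xs.foldl pvStepA (sums, 0, false)) = sums ++ sum_non_zero_groups_alt xs) := by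
  induction n with
  | zero =>
    intro xs h
    have : xs = [] := List.eq_nil_of_length_eq_zero (Nat.le_zero.mp h)
    subst this
    constructor
    · intro sums c; simp [pvFin, pvSpan, sum_non_zero_groups_alt]
    · intro sums; simp [pvFin, sum_non_zero_groups_alt]
  | succ n ih =>
    intro xs h
    match xs with
    | [] =>
      constructor
      · intro sums c; simp [pvFin, pvSpan, sum_non_zero_groups_alt]
      · intro sums; simp [pvFin, sum_non_zero_groups_alt]
    | x :: xs' =>
      have hlen : xs'.length ≤ n := by simpa using h
      constructor
      · intro sums c
        by_cases hx : x = 0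
        · subst hx
          have := (ih xs' hlen).2 (sums ++ [c])
          simp [List.foldl, pvStepA, pvSpan, sum_non_zero_groups_alt, this]
        · have := (ih xs' hlen).1 sums (c + x)
          simp [List.foldl, pvStepA, pvSpan, hx, this]
      · intro sums
        by_cases hx : x = 0
        · subst hx
          have := (ih xs' hlen).2 sums
          simp [List.foldl, pvStepA, sum_non_zero_groups_alt, this]
        · have := (ih xs' hlen).1 sums x
          simp [List.foldl, pvStepA, hx, this, sum_non_zero_groups_alt]

-- ===== VERDICT (by name: the statement is the Claim_ definition above) =====
theorem sum_non_zero_groups_spec : Claim_equal_sum_non_zero_groups := by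
  intro nums _
  unfold Spec_sum_non_zero_groups sum_non_zero_groups
  have := (pvLoop_inv nums.length nums le_rfl).2 []
  simpa [pvFin] using this
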